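-- pv_equiv track=rewrite | github.com/dsfxjk/PL-Mescheryakov-Daniil | 7.10.1.py | find
-- ===== SOURCE A (Python) =====
-- def find(a,b,c,N):
--     count = 0
--     digit_set = {str(a), str(b), str(c)}
--     for i in range(100, N+1):
--         number = str(i)
--         if all(x in digit_set for x in number):
--             count += 1
--     return count
-- ===== SOURCE B (Python) =====
-- def find(a, b, c, N):
--     allowed = sorted({d for d in (a, b, c) if 0 <= d <= 9})
--
--     def ok(q):
--         while q > 0:
--             if q % 10 not in allowed:
--                 return False
--             q //= 10
--         return True
--
--     def count_upto(x):
--         # numbers in [1, x] whose decimal digits all lie in `allowed`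
--         if x <= 0:
--             return 0
--         if x < 10:
--             return sum(1 for d in allowed if 1 <= d <= x)
--         q, r = divmod(x, 10)
--         total = sum(1 for d in allowed if 1 <= d)
--         total += len(allowed) * count_upto(q - 1)
--         if ok(q):
--             total += sum(1 for d in allowed if d <= r)
--         return total
--
--     if N < 100:
--         return 0
--     return count_upto(N) - count_upto(99)
-- ===== Notes on version B (the rewrite author's own statement) =====
-- stated objective: faster
-- what changed: A tests every number in [100, N] digit-by-digit via strings; B counts the valid numbers with a digit-count recursion on N/10 (numbers below 10q split into full blocks of allowed digits plus one partial block), so the scan over [100, N] disappears.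
import Mathlib
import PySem

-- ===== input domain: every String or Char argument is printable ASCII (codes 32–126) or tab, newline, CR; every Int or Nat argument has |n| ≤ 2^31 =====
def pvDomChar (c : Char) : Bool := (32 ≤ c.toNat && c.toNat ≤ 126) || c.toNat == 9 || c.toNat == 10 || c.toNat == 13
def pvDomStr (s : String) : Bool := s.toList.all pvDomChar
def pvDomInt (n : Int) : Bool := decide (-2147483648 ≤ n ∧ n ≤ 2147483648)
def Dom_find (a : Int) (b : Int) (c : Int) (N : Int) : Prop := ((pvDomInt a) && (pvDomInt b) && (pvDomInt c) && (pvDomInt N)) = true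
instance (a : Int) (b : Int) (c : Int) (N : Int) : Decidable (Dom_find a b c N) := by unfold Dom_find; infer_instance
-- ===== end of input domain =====

-- B replaces A's scan of every number in [100, N] by an O(log² N) digit-count recursion; a timing run measures the speed-up.

-- ===== PORT A =====
def find (a : Int) (b : Int) (c : Int) (N : Int) : Int :=
  let digitSet : PySem.Set String :=
    PySem.Set.ofList [PySem.Int.toStr a, PySem.Int.toStr b, PySem.Int.toStr c]
  (PySem.List.pyRange 100 (N + 1) 1).foldl (fun count i =>
    let number := PySem.Int.toStr i
    if (number.toList.all (fun x => PySem.Set.contains digitSet (String.ofList [x]))) then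
      count + 1
    else count) 0

-- ===== PORT B =====
-- helper `ok(q)`: every decimal digit of q (q > 0) lies in `allowed`
def findAltOk (allowed : List Int) (q : Int) : Bool :=
  if _h : 0 < q then
    if PySem.Int.mod q 10 ∈ allowed then findAltOk allowed (PySem.Int.floordiv q 10)
    else false
  else true
termination_by q.toNat
decreasing_by
  simp only [PySem.Int.floordiv]
  rw [Int.fdiv_eq_ediv] <;> omega


-- helper `count_upto(x)`: how many n in [1, x] have all digits in `allowed`
def findAltCount (allowed : List Int) (x : Int) : Int :=
  if x ≤ 0 then 0
  else if x < 10 then ((allowed.filter (fun d => decide (1 ≤ d ∧ d ≤ x))).length : Int)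
  else
    let q := PySem.Int.floordiv x 10
    let r := PySem.Int.mod x 10
    let total := ((allowed.filter (fun d => decide (1 ≤ d))).length : Int)
    let total := total + (allowed.length : Int) * findAltCount allowed (q - 1)
    if findAltOk allowed q then
      total + ((allowed.filter (fun d => decide (d ≤ r))).length : Int)
    else total
termination_by x.toNat
decreasing_by
  simp only [PySem.Int.floordiv]
  rw [Int.fdiv_eq_ediv] <;> omega


def find_alt (a : Int) (b : Int) (c : Int) (N : Int) : Int :=
  let allowed : List Int :=
    PySem.List.sorted
      (PySem.Set.ofList ([a, b, c].filter (fun d => decide (0 ≤ d ∧ d ≤ 9))))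
      (fun d => d) false
  if N < 100 then 0
  else findAltCount allowed N - findAltCount allowed 99

-- ===== PRECONDITION & SPEC =====
def Spec_find (a : Int) (b : Int) (c : Int) (N : Int) (out : Int) : Prop := out = find_alt a b c N
instance (a : Int) (b : Int) (c : Int) (N : Int) (out : Int) : Decidable (Spec_find a b c N out) := by unfold Spec_find; infer_instance

-- ===== CLAIM (what is proved, stated in full; the proofs are below) =====
def Claim_equal_find : Prop := ∀ (a : Int) (b : Int) (c : Int) (N : Int), Dom_find a b c N → Spec_find a b c N (find a b c N)

-- ===== LEMMAS AND PROOFS =====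

-- ## Nat.toDigits structure

theorem toDigitsCore_shift (f n : ℕ) (acc : List Char) :
    Nat.toDigitsCore 10 f n acc = Nat.toDigitsCore 10 f n [] ++ acc := by
  induction f generalizing n acc with
  | zero => simp [Nat.toDigitsCore]
  | succ f ih =>
    simp only [Nat.toDigitsCore]
    by_cases h : n / 10 = 0
    · simp [h]
    · simp only [h, if_false]
      rw [ih (n / 10) (Nat.digitChar (n % 10) :: acc), ih (n / 10) [Nat.digitChar (n % 10)]]
      simp

theorem toDigitsCore_fuel (f₁ f₂ n : ℕ) (h₁ : n < f₁) (h₂ : n < f₂) :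
    Nat.toDigitsCore 10 f₁ n [] = Nat.toDigitsCore 10 f₂ n [] := by
  induction n using Nat.strong_induction_on generalizing f₁ f₂ with
  | _ n ih =>
    cases f₁ with
    | zero => omega
    | succ f₁ =>
      cases f₂ with
      | zero => omega
      | succ f₂ =>
        simp only [Nat.toDigitsCore]
        by_cases h : n / 10 = 0
        · simp [h]
        · simp only [h, if_false]
          rw [toDigitsCore_shift f₁, toDigitsCore_shift f₂,
            ih (n / 10) (by omega) f₁ f₂ (by omega) (by omega)]

theorem toDigits_lt_ten {n : ℕ} (h : n < 10) :
    Nat.toDigits 10 n = [Nat.digitChar n] := by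
  unfold Nat.toDigits
  simp [Nat.toDigitsCore, Nat.div_eq_of_lt h, Nat.mod_eq_of_lt h]

theorem toDigits_ge_ten {n : ℕ} (h : 10 ≤ n) :
    Nat.toDigits 10 n = Nat.toDigits 10 (n / 10) ++ [Nat.digitChar (n % 10)] := by
  unfold Nat.toDigits
  conv_lhs => rw [show n + 1 = (n) + 1 from rfl]
  simp only [Nat.toDigitsCore]
  have h0 : ¬ n / 10 = 0 := by omega
  simp only [h0, if_false]
  rw [toDigitsCore_shift n (n / 10)]
  congr 1
  exact toDigitsCore_fuel n (n / 10 + 1) (n / 10) (by omega) (by omega)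

theorem toDigits_ne_nil (n : ℕ) : Nat.toDigits 10 n ≠ [] := by
  rcases lt_or_ge n 10 with h | h
  · simp [toDigits_lt_ten h]
  · simp [toDigits_ge_ten h]

theorem digitChar_inj : ∀ m < 10, ∀ k < 10, Nat.digitChar m = Nat.digitChar k → m = k := by
  decide

-- str(e) is a single digit character iff e is that digit
theorem toStr_eq_single_digit (e : ℤ) (d : ℕ) (hd : d < 10) :
    PySem.Int.toStr e = String.ofList [Nat.digitChar d] ↔ e = (d : ℤ) := by
  constructor
  · intro h
    have h' : PySem.Int.toChars e = [Nat.digitChar d] := by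
      have h2 := congrArg String.toList h
      rwa [PySem.Int.toList_toStr, String.toList_ofList] at h2
    unfold PySem.Int.toChars at h'
    by_cases he : e < 0
    · simp only [he, if_true] at h'
      exact absurd ((List.cons.injEq ..).mp h').2 (toDigits_ne_nil _)
    · simp only [he, if_false] at h'
      rcases lt_or_ge e.toNat 10 with h10 | h10
      · rw [toDigits_lt_ten h10] at h'
        have := digitChar_inj e.toNat h10 d hd ((List.cons.injEq ..).mp h').1
        omega
      · rw [toDigits_ge_ten h10] at h'
        have hlen := congrArg List.length h'
        have hne := toDigits_ne_nil (e.toNat / 10)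
        rw [List.length_append] at hlen
        have h0 : (Nat.toDigits 10 (e.toNat / 10)).length = 0 := by simp at hlen ⊢; omega
        exact absurd (List.length_eq_zero_iff.mp h0) hne
  · intro h
    subst h
    unfold PySem.Int.toStr PySem.Int.toChars
    have : ¬ ((d : ℤ) < 0) := by omega
    rw [if_neg this, Int.toNat_natCast, toDigits_lt_ten hd]

-- ## The allowed-digit list

theorem mem_allowedOf (a b c : ℤ) (d : ℤ) :
    d ∈ (PySem.List.sorted
      (PySem.Set.ofList ([a, b, c].filter (fun d => decide (0 ≤ d ∧ d ≤ 9))))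
      (fun d => d) false) ↔ ((d = a ∨ d = b ∨ d = c) ∧ 0 ≤ d ∧ d ≤ 9) := by
  rw [PySem.List.mem_sorted, PySem.Set.mem_ofList, List.mem_filter]
  simp

theorem nodup_allowedOf (a b c : ℤ) :
    (PySem.List.sorted
      (PySem.Set.ofList ([a, b, c].filter (fun d => decide (0 ≤ d ∧ d ≤ 9))))
      (fun d => d) false).Nodup :=
  ((PySem.List.sorted_perm _ _ _).nodup_iff).mpr (PySem.Set.nodup_ofList _)

-- ## ok vs the character test of A

theorem findAltOk_pos (L : List Int) (q : ℤ) (h : 0 < q) :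
    findAltOk L q = ((decide ((q % 10) ∈ L)) && findAltOk L (q / 10)) := by
  rw [findAltOk.eq_def]
  have hm : PySem.Int.mod q 10 = q % 10 := PySem.Int.mod_eq_emod_of_pos (by norm_num)
  have hf : PySem.Int.floordiv q 10 = q / 10 := PySem.Int.floordiv_eq_ediv_of_pos (by norm_num)
  rw [hm, hf]
  simp only [h, dite_true]
  by_cases hmem : (q % 10) ∈ L <;> simp [hmem]

theorem contains_digit (a b c : ℤ) (d : ℕ) (hd : d < 10) :
    PySem.Set.contains (PySem.Set.ofList [PySem.Int.toStr a, PySem.Int.toStr b, PySem.Int.toStr c])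
        (String.ofList [Nat.digitChar d])
      = decide ((d : ℤ) ∈ (PySem.List.sorted
          (PySem.Set.ofList ([a, b, c].filter (fun d => decide (0 ≤ d ∧ d ≤ 9))))
          (fun d => d) false)) := by
  have key : (String.ofList [Nat.digitChar d] ∈
      PySem.Set.ofList [PySem.Int.toStr a, PySem.Int.toStr b, PySem.Int.toStr c]) ↔
      ((d : ℤ) ∈ (PySem.List.sorted
          (PySem.Set.ofList ([a, b, c].filter (fun d => decide (0 ≤ d ∧ d ≤ 9))))
          (fun d => d) false)) := by
    rw [PySem.Set.mem_ofList, mem_allowedOf]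
    simp only [List.mem_cons, List.not_mem_nil, or_false]
    constructor
    · rintro (h | h | h)
      · exact ⟨Or.inl ((toStr_eq_single_digit a d hd).mp h.symm).symm, by omega, by omega⟩
      · exact ⟨Or.inr (Or.inl ((toStr_eq_single_digit b d hd).mp h.symm).symm), by omega, by omega⟩
      · exact ⟨Or.inr (Or.inr ((toStr_eq_single_digit c d hd).mp h.symm).symm), by omega, by omega⟩
    · rintro ⟨(h | h | h), -, -⟩
      · exact Or.inl ((toStr_eq_single_digit a d hd).mpr h.symm).symm
      · exact Or.inr (Or.inl ((toStr_eq_single_digit b d hd).mpr h.symm).symm)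
      · exact Or.inr (Or.inr ((toStr_eq_single_digit c d hd).mpr h.symm).symm)
  simp [PySem.Set.contains, key]

theorem findAltOk_zero (L : List Int) : findAltOk L 0 = true := by
  rw [findAltOk.eq_def]; simp

theorem toChars_lt (i : ℤ) (h0 : 0 < i) (h : i < 10) :
    PySem.Int.toChars i = [Nat.digitChar i.toNat] := by
  unfold PySem.Int.toChars
  rw [if_neg (by omega), toDigits_lt_ten (by omega)]

theorem toChars_ge (i : ℤ) (h : 10 ≤ i) :
    PySem.Int.toChars i = PySem.Int.toChars (i / 10) ++ [Nat.digitChar (i % 10).toNat] := by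
  unfold PySem.Int.toChars
  rw [if_neg (by omega), if_neg (by omega), toDigits_ge_ten (show 10 ≤ i.toNat by omega)]
  have h1 : i.toNat / 10 = (i / 10).toNat := by omega
  have h2 : i.toNat % 10 = (i % 10).toNat := by omega
  rw [h1, h2]

theorem charTest_eq_ok (a b c : ℤ) (i : ℤ) (hi : 0 < i) :
    ((PySem.Int.toStr i).toList.all (fun x =>
        PySem.Set.contains (PySem.Set.ofList [PySem.Int.toStr a, PySem.Int.toStr b, PySem.Int.toStr c]) (String.ofList [x])))
      = findAltOk (PySem.List.sorted
          (PySem.Set.ofList ([a, b, c].filter (fun d => decide (0 ≤ d ∧ d ≤ 9))))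
          (fun d => d) false) i := by
  induction hn : i.toNat using Nat.strong_induction_on generalizing i with
  | _ n ih =>
  rw [PySem.Int.toList_toStr]
  rcases lt_or_ge i 10 with h10 | h10
  · rw [toChars_lt i hi h10, findAltOk_pos _ i hi]
    have h1 : i % 10 = i := by omega
    have h2 : i / 10 = 0 := by omega
    rw [List.all_cons, List.all_nil, contains_digit a b c i.toNat (by omega), h1, h2,
      findAltOk_zero, Int.toNat_of_nonneg (by omega)]
  · rw [toChars_ge i h10, List.all_append, findAltOk_pos _ i hi]
    have hIH := ih (i / 10).toNat (by omega) (i / 10) (by omega) rfl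
    rw [PySem.Int.toList_toStr] at hIH
    rw [List.all_cons, List.all_nil, contains_digit a b c (i % 10).toNat (by omega),
      Int.toNat_of_nonneg (show (0:ℤ) ≤ i % 10 by omega), hIH]
    simp [Bool.and_comm]

-- ## counting: findAltCount = card of the ok-filtered interval

theorem card_filter_mem (L : List Int) (hnd : L.Nodup) (lo hi : ℤ) :
    ((Finset.Icc lo hi).filter (fun n => n ∈ L)).card
      = (L.filter (fun d => decide (lo ≤ d ∧ d ≤ hi))).length := by
  rw [← List.toFinset_card_of_nodup (hnd.filter _), List.toFinset_filter]
  congr 1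
  ext n
  simp [Finset.mem_filter, List.mem_toFinset, and_comm]

theorem cntSplit (p : ℤ → Bool) (lo mid hi : ℤ) (h1 : lo ≤ mid) (h2 : mid ≤ hi + 1) :
    ((Finset.Icc lo hi).filter (fun n => p n = true)).card
      = ((Finset.Icc lo (mid - 1)).filter (fun n => p n = true)).card
        + ((Finset.Icc mid hi).filter (fun n => p n = true)).card := by
  have hu : Finset.Icc lo hi = Finset.Icc lo (mid - 1) ∪ Finset.Icc mid hi := by
    ext n; simp only [Finset.mem_Icc, Finset.mem_union]; omega
  have hd : Disjoint (Finset.Icc lo (mid - 1)) (Finset.Icc mid hi) := by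
    rw [Finset.disjoint_left]; intro n hn hn'
    simp only [Finset.mem_Icc] at hn hn'; omega
  rw [hu, Finset.filter_union, Finset.card_union_of_disjoint (Finset.disjoint_filter_filter hd)]

theorem findAltOk_small (L : List Int) (n : ℤ) (h0 : 0 < n) (h : n < 10) :
    findAltOk L n = decide (n ∈ L) := by
  rw [findAltOk_pos L n h0, show n % 10 = n by omega, show n / 10 = 0 by omega,
    findAltOk_zero, Bool.and_true]

theorem card_small (L : List Int) (hnd : L.Nodup) (x : ℤ) (h : x < 10) :
    ((Finset.Icc 1 x).filter (fun n => findAltOk L n = true)).card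
      = (L.filter (fun d => decide (1 ≤ d ∧ d ≤ x))).length := by
  rw [Finset.filter_congr (q := fun n => n ∈ L) (fun n hn => ?_), card_filter_mem L hnd 1 x]
  simp only [Finset.mem_Icc] at hn
  rw [findAltOk_small L n (by omega) (by omega)]
  simp

theorem card_block (L : List Int) (hnd : L.Nodup) (hL : ∀ d ∈ L, 0 ≤ d ∧ d ≤ 9)
    (k r : ℤ) (hk : 1 ≤ k) (hr0 : 0 ≤ r) (hr : r ≤ 9) :
    ((Finset.Icc (10*k) (10*k+r)).filter (fun n => findAltOk L n = true)).card
      = if findAltOk L k then (L.filter (fun d => decide (d ≤ r))).length else 0 := by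
  have hmap : Finset.Icc (10*k) (10*k+r) = (Finset.Icc (0:ℤ) r).map (addLeftEmbedding (10*k)) := by
    rw [Finset.map_add_left_Icc]; ring_nf
  rw [hmap, Finset.filter_map, Finset.card_map]
  have hcongr : ∀ d ∈ Finset.Icc (0:ℤ) r,
      ((fun n => findAltOk L n = true) ∘ (addLeftEmbedding (10*k))) d
        ↔ ((decide (d ∈ L) && findAltOk L k) = true) := by
    intro d hd
    simp only [Finset.mem_Icc] at hd
    simp only [Function.comp, addLeftEmbedding_apply]
    rw [findAltOk_pos L _ (by omega), show (10*k+d) % 10 = d by omega,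
      show (10*k+d) / 10 = k by omega]
  rw [Finset.filter_congr hcongr]
  by_cases hok : findAltOk L k
  · rw [if_pos hok]
    simp only [hok, Bool.and_true]
    have : ((Finset.Icc (0:ℤ) r).filter (fun d => decide (d ∈ L) = true)).card
        = ((Finset.Icc (0:ℤ) r).filter (fun n => n ∈ L)).card := by
      apply congrArg
      apply Finset.filter_congr
      intro d _; simp
    rw [this, card_filter_mem L hnd 0 r]
    apply congrArg
    apply List.filter_congr
    intro d hd
    have := hL d hd
    simp only [decide_eq_decide]
    omega
  · rw [if_neg hok]
    simp [hok]

theorem card_blocks (L : List Int) (hnd : L.Nodup) (hL : ∀ d ∈ L, 0 ≤ d ∧ d ≤ 9) (m : ℕ) :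
    ((Finset.Icc 1 (10*(m:ℤ)+9)).filter (fun n => findAltOk L n = true)).card
      = ((Finset.Icc (1:ℤ) 9).filter (fun n => findAltOk L n = true)).card
        + L.length * ((Finset.Icc (1:ℤ) (m:ℤ)).filter (fun n => findAltOk L n = true)).card := by
  induction m with
  | zero => simp
  | succ m ih =>
    have hsplit := cntSplit (findAltOk L) 1 (10*((m:ℤ)+1)) (10*((m:ℤ)+1)+9) (by omega) (by omega)
    have e1 : (10*(((m+1:ℕ)):ℤ)+9) = 10*((m:ℤ)+1)+9 := by push_cast; ring
    have e2 : (10*((m:ℤ)+1) - 1) = 10*(m:ℤ)+9 := by ring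
    rw [e1, hsplit, e2, ih]
    have hblock := card_block L hnd hL ((m:ℤ)+1) 9 (by omega) (by omega) (by omega)
    have e3 : (L.filter (fun d => decide (d ≤ (9:ℤ)))).length = L.length := by
      rw [List.filter_eq_self.mpr]
      intro d hd
      have := hL d hd
      simp; omega
    rw [hblock, e3]
    have hsplit2 := cntSplit (findAltOk L) 1 ((m:ℤ)+1) ((m:ℤ)+1) (by omega) (by omega)
    have e4 : (((m+1:ℕ)):ℤ) = (m:ℤ)+1 := by push_cast; ring
    have e5 : ((m:ℤ)+1-1) = (m:ℤ) := by ring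
    rw [e4, hsplit2, e5, Finset.Icc_self, Finset.filter_singleton]
    by_cases hok : findAltOk L ((m:ℤ)+1)
    · simp only [hok, if_pos, Finset.card_singleton]
      simp [Nat.mul_add]
      omega
    · simp [hok]

theorem findAltCount_eq_card (L : List Int) (hnd : L.Nodup)
    (hL : ∀ d ∈ L, 0 ≤ d ∧ d ≤ 9) (x : ℤ) (hx : 0 ≤ x) :
    findAltCount L x = (((Finset.Icc 1 x).filter (fun n => findAltOk L n = true)).card : ℤ) := by
  induction hn : x.toNat using Nat.strong_induction_on generalizing x with
  | _ n ih =>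
  rw [findAltCount.eq_def]
  by_cases hx0 : x ≤ 0
  · have : x = 0 := by omega
    subst this
    simp
  · rw [if_neg hx0]
    by_cases hx10 : x < 10
    · rw [if_pos hx10, card_small L hnd x hx10]
    · rw [if_neg hx10]
      have hq : PySem.Int.floordiv x 10 = x / 10 := PySem.Int.floordiv_eq_ediv_of_pos (by norm_num)
      have hr : PySem.Int.mod x 10 = x % 10 := PySem.Int.mod_eq_emod_of_pos (by norm_num)
      simp only [hq, hr]
      -- split [1,x] at 10*(x/10)
      have hsplit := cntSplit (findAltOk L) 1 (10*(x/10)) x (by omega) (by omega)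
      have hxeq : x = 10*(x/10) + x % 10 := by omega
      have hblock : ((Finset.Icc (10*(x/10)) x).filter (fun n => findAltOk L n = true)).card
          = if findAltOk L (x/10) then (L.filter (fun d => decide (d ≤ x % 10))).length else 0 := by
        conv_lhs => rw [show (Finset.Icc (10*(x/10)) x) = Finset.Icc (10*(x/10)) (10*(x/10) + x % 10) by rw [← hxeq]]
        exact card_block L hnd hL (x/10) (x % 10) (by omega) (by omega) (by omega)
      have e1 : (10*(x/10) - 1) = 10*(x/10 - 1) + 9 := by ring
      have hblocks := card_blocks L hnd hL (x/10 - 1).toNat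
      have hIH := ih (x/10 - 1).toNat (by omega) (x/10 - 1) (by omega) rfl
      have e2 : (((x/10 - 1).toNat : ℤ)) = x/10 - 1 := by omega
      rw [e2] at hblocks
      have e9 : ((Finset.Icc (1:ℤ) 9).filter (fun n => findAltOk L n = true)).card
          = (L.filter (fun d => decide (1 ≤ d))).length := by
        rw [card_small L hnd 9 (by omega)]
        apply congrArg
        apply List.filter_congr
        intro d hd
        have := hL d hd
        simp only [decide_eq_decide]
        omega
      rw [hsplit, hblock, e1, hblocks, e9, hIH]
      by_cases hok : findAltOk L (x/10)
      · simp only [hok, if_pos]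
        push_cast
        ring
      · simp only [hok, Bool.false_eq_true, if_false]
        push_cast
        ring

-- ## A's fold as a countP, and assembly

theorem foldl_count (p : ℤ → Bool) (xs : List ℤ) (init : ℤ) :
    xs.foldl (fun count i => if p i then count + 1 else count) init
      = init + (xs.countP p : ℤ) := by
  induction xs generalizing init with
  | nil => simp
  | cons y ys ih =>
    by_cases h : p y <;> simp [h, ih] <;> ring

theorem countP_pyRange (p : ℤ → Bool) (lo hi : ℤ) :
    ((PySem.List.pyRange lo (hi + 1) 1).countP p : ℤ)
      = (((Finset.Icc lo hi).filter (fun n => p n = true)).card : ℤ) := by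
  congr 1
  rw [List.countP_eq_length_filter,
    ← List.toFinset_card_of_nodup ((PySem.List.nodup_pyRange_one lo (hi+1)).filter p),
    List.toFinset_filter]
  congr 1
  ext n
  simp [List.mem_toFinset, PySem.List.mem_pyRange_one, Finset.mem_Icc]

-- ===== VERDICT (by name: the statement is the Claim_ definition above) =====
theorem find_spec : Claim_equal_find := by
  intro a b c N _
  show find a b c N = find_alt a b c N
  have hnd := nodup_allowedOf a b c
  have hL : ∀ d ∈ (PySem.List.sorted
      (PySem.Set.ofList ([a, b, c].filter (fun d => decide (0 ≤ d ∧ d ≤ 9))))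
      (fun d => d) false), 0 ≤ d ∧ d ≤ 9 :=
    fun d hd => ((mem_allowedOf a b c d).mp hd).2
  by_cases hN : N < 100
  · rw [find, find_alt, if_pos hN, PySem.List.pyRange_one_eq_nil (by omega)]
    rfl
  · rw [find, find_alt, if_neg hN]
    show (PySem.List.pyRange 100 (N + 1) 1).foldl (fun count i =>
        if ((PySem.Int.toStr i).toList.all (fun x =>
          PySem.Set.contains (PySem.Set.ofList [PySem.Int.toStr a, PySem.Int.toStr b, PySem.Int.toStr c])
            (String.ofList [x]))) then count + 1 else count) 0
      = findAltCount (PySem.List.sorted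
          (PySem.Set.ofList ([a, b, c].filter (fun d => decide (0 ≤ d ∧ d ≤ 9))))
          (fun d => d) false) N
        - findAltCount (PySem.List.sorted
          (PySem.Set.ofList ([a, b, c].filter (fun d => decide (0 ≤ d ∧ d ≤ 9))))
          (fun d => d) false) 99
    rw [foldl_count, zero_add]
    rw [List.countP_congr (q := fun i => findAltOk (PySem.List.sorted
        (PySem.Set.ofList ([a, b, c].filter (fun d => decide (0 ≤ d ∧ d ≤ 9))))
        (fun d => d) false) i) (fun i hi => ?_)]
    · rw [countP_pyRange]
      have hsplit := cntSplit (findAltOk (PySem.List.sorted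
          (PySem.Set.ofList ([a, b, c].filter (fun d => decide (0 ≤ d ∧ d ≤ 9))))
          (fun d => d) false)) 1 100 N (by omega) (by omega)
      rw [findAltCount_eq_card _ hnd hL N (by omega),
        findAltCount_eq_card _ hnd hL 99 (by omega)]
      rw [show (100:ℤ) - 1 = 99 from rfl] at hsplit
      omega
    · rw [PySem.List.mem_pyRange_one] at hi
      rw [charTest_eq_ok a b c i (by omega)]
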